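-- pv_equiv track=rewrite | github.com/charan21042005/gfg-solutions | POTD/Day-14_Police-and-Thieves/Solution.py | catchThieves
-- ===== SOURCE A (Python) =====
-- def catchThieves(arr, k):
--
--     police = []
--     thieves = []
--
--     # Store positions
--     for i in range(len(arr)):
--         if arr[i] == 'P':
--             police.append(i)
--         elif arr[i] == 'T':
--             thieves.append(i)
--
--     i = j = 0
--     count = 0
--
--     # Two-pointer greedy matching
--     while i < len(police) and j < len(thieves):
--         if abs(police[i] - thieves[j]) <= k:
--             count += 1
--             i += 1
--             j += 1
--         elif police[i] < thieves[j]: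
--             i += 1
--         else:
--             j += 1
--
--     return count
-- ===== SOURCE B (Python) =====
-- def catchThieves(arr, k):
--     qp = []  # unmatched police indices (FIFO)
--     qt = []  # unmatched thief indices (FIFO)
--     count = 0
--     for i, c in enumerate(arr):
--         # expire entries that are out of the distance window
--         while qp and qp[0] < i - k:
--             qp.pop(0)
--         while qt and qt[0] < i - k:
--             qt.pop(0)
--         if c == 'P':
--             if qt:
--                 qt.pop(0)
--                 count += 1
--             else:
--                 qp.append(i)
--         elif c == 'T':
--             if qp:
--                 qp.pop(0)
--                 count += 1
--             else:
--                 qt.append(i)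
--     return count
-- ===== Notes on version B (the rewrite author's own statement) =====
-- stated objective: alternative
-- what changed: B replaces A's collect-positions-then-two-pointer-match scheme by a single left-to-right pass that keeps FIFO queues of unmatched police/thief indices, expiring queue fronts that fall out of the distance-k window and matching the current index against the opposite queue.
import Mathlib
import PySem

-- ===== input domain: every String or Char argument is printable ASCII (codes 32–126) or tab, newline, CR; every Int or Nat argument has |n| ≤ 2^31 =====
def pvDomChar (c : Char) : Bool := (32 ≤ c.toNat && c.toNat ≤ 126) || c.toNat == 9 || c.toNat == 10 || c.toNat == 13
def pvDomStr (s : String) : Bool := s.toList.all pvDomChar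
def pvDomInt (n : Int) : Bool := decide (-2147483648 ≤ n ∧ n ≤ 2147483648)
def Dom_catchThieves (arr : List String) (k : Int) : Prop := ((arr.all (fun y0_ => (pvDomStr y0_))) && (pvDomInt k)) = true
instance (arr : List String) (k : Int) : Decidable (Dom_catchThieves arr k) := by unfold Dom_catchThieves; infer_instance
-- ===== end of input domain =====

-- B replaces A's collect-then-two-pointer matching by a single pass with two FIFO
-- queues of unmatched indices expired outside the distance-k window (alternative
-- decomposition, same O(n) cost); proved to return the same count on all inputs.


-- ===== PORT A =====
-- A's first for-loop: walk the array with the running index i, collecting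
-- (police positions, thief positions) in order.
def collectPT (arr : List String) (i : Int) : List Int × List Int :=
  match arr with
  | [] => ([], [])
  | s :: rest =>
    let pt := collectPT rest (i + 1)
    if s == "P" then (i :: pt.1, pt.2)
    else if s == "T" then (pt.1, i :: pt.2)
    else pt

-- A's while loop: two-pointer greedy matching over the two position lists,
-- the index pair (i, j) rendered as the two remaining suffixes.
def tpA (police thieves : List Int) (k : Int) (count : Int) : Int :=
  match police, thieves with
  | p :: ps, t :: ts =>
    if |p - t| ≤ k then tpA ps ts k (count + 1)
    else if p < t then tpA ps (t :: ts) k count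
    else tpA (p :: ps) ts k count
  | _, _ => count
termination_by police.length + thieves.length

def catchThieves (arr : List String) (k : Int) : Int :=
  let pt := collectPT arr 0
  tpA pt.1 pt.2 k 0

-- ===== PORT B =====
-- Source B's inner while loops: pop from the front while the front is < lim.
def expire (q : List Int) (lim : Int) : List Int :=
  match q with
  | [] => []
  | x :: rest => if x < lim then expire rest lim else x :: rest

-- Source B's for loop: single pass, i the current index, qp/qt the FIFO queues of
-- unmatched police/thief indices, count the matches so far.
def bLoop (arr : List String) (k : Int) (i : Int) (qp qt : List Int) (count : Int) : Int :=
  match arr with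
  | [] => count
  | s :: rest =>
    let qp := expire qp (i - k)
    let qt := expire qt (i - k)
    if s == "P" then
      match qt with
      | _ :: qt' => bLoop rest k (i + 1) qp qt' (count + 1)
      | [] => bLoop rest k (i + 1) (qp ++ [i]) qt count
    else if s == "T" then
      match qp with
      | _ :: qp' => bLoop rest k (i + 1) qp' qt (count + 1)
      | [] => bLoop rest k (i + 1) qp (qt ++ [i]) count
    else bLoop rest k (i + 1) qp qt count

def catchThieves_alt (arr : List String) (k : Int) : Int :=
  bLoop arr k 0 [] [] 0

-- ===== PRECONDITION & SPEC =====
def Spec_catchThieves (arr : List String) (k : Int) (out : Int) : Prop := out = catchThieves_alt arr k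
instance (arr : List String) (k : Int) (out : Int) : Decidable (Spec_catchThieves arr k out) := by unfold Spec_catchThieves; infer_instance

-- ===== CLAIM (what is proved, stated in full; the proofs are below) =====
def Claim_equal_catchThieves : Prop := ∀ (arr : List String) (k : Int), Dom_catchThieves arr k → Spec_catchThieves arr k (catchThieves arr k)

-- ===== LEMMAS AND PROOFS =====

-- unfolding equations for the well-founded `tpA`
theorem tpA_nil_right (L : List Int) (k c : Int) : tpA L [] k c = c := by
  cases L <;> simp [tpA]

theorem tpA_nil_left (R : List Int) (k c : Int) : tpA [] R k c = c := by
  cases R <;> simp [tpA]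

theorem tpA_cons (p t : Int) (ps ts : List Int) (k c : Int) :
    tpA (p :: ps) (t :: ts) k c =
      if |p - t| ≤ k then tpA ps ts k (c + 1)
      else if p < t then tpA ps (t :: ts) k c
      else tpA (p :: ps) ts k c := by
  rw [tpA]

-- `expire` splits its input: dropped prefix (all < lim) ++ result.
theorem expire_decomp (q : List Int) (lim : Int) :
    ∃ E, q = E ++ expire q lim ∧ ∀ e ∈ E, e < lim := by
  induction q with
  | nil => exact ⟨[], rfl, by simp⟩
  | cons x rest ih =>
    by_cases h : x < lim
    · obtain ⟨E, hE, hlt⟩ := ih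
      refine ⟨x :: E, ?_, ?_⟩
      · simp [expire, h, ← hE]
      · intro e he; rcases List.mem_cons.1 he with rfl | he
        · exact h
        · exact hlt e he
    · exact ⟨[], by simp [expire, h], by simp⟩

theorem expire_head_ge (q : List Int) (lim : Int) :
    ∀ {t rest}, expire q lim = t :: rest → ¬ t < lim := by
  induction q with
  | nil => intro t rest h; simp [expire] at h
  | cons x xs ih =>
    intro t rest h
    by_cases hx : x < lim
    · exact ih (by simpa [expire, hx] using h)
    · simp [expire, hx] at h; omega

theorem expire_nil_all (q : List Int) (lim : Int) (h : expire q lim = []) :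
    ∀ x ∈ q, x < lim := by
  obtain ⟨E, hE, hlt⟩ := expire_decomp q lim
  rw [h, List.append_nil] at hE
  intro x hx; exact hlt x (hE ▸ hx)

theorem expire_mem {q : List Int} {lim x : Int} (hx : x ∈ expire q lim) : x ∈ q := by
  obtain ⟨E, hE, _⟩ := expire_decomp q lim
  rw [hE]; exact List.mem_append_right _ hx

-- Dropping an expired police prefix does not change the two-pointer result.
theorem tpA_dropP (k : Int) (E : List Int) :
    ∀ L R c, (∀ e ∈ E, ∀ t ∈ R, e < t ∧ ¬ |e - t| ≤ k) →
      tpA (E ++ L) R k c = tpA L R k c := by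
  induction E with
  | nil => intro L R c _; rfl
  | cons e E ih =>
    intro L R c hER
    cases R with
    | nil => rw [tpA_nil_right, tpA_nil_right]
    | cons t ts =>
      have h := hER e (by simp) t (by simp)
      rw [List.cons_append, tpA_cons]
      simp only [if_neg h.2, if_pos h.1]
      exact ih L (t :: ts) c (fun e' he' => hER e' (by simp [he']))

-- Dropping an expired thief prefix does not change the two-pointer result.
theorem tpA_dropT (k : Int) (E : List Int) :
    ∀ L R c, (∀ e ∈ E, ∀ p ∈ L, e < p ∧ ¬ |p - e| ≤ k) →
      tpA L (E ++ R) k c = tpA L R k c := by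
  induction E with
  | nil => intro L R c _; rfl
  | cons e E ih =>
    intro L R c hER
    cases L with
    | nil => rw [tpA_nil_left, tpA_nil_left]
    | cons p ps =>
      have h := hER e (by simp) p (by simp)
      rw [List.cons_append, tpA_cons]
      have hnp : ¬ p < e := by omega
      simp only [if_neg h.2, if_neg hnp]
      exact ih (p :: ps) R c (fun e' he' => hER e' (by simp [he']))

-- Every position collected from the suffix starting at i is at least i.
theorem collectPT_ge (arr : List String) :
    ∀ i : Int, (∀ x ∈ (collectPT arr i).1, i ≤ x) ∧ (∀ x ∈ (collectPT arr i).2, i ≤ x) := by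
  induction arr with
  | nil => intro i; simp [collectPT]
  | cons s rest ih =>
    intro i
    obtain ⟨h1, h2⟩ := ih (i + 1)
    have g1 : ∀ x ∈ (collectPT rest (i + 1)).1, i ≤ x := fun x hx => by
      have := h1 x hx; omega
    have g2 : ∀ x ∈ (collectPT rest (i + 1)).2, i ≤ x := fun x hx => by
      have := h2 x hx; omega
    simp only [collectPT]
    split_ifs
    · exact ⟨fun x hx => by
        rcases List.mem_cons.1 hx with rfl | hx
        · omega
        · exact g1 x hx, g2⟩
    · exact ⟨g1, fun x hx => by
        rcases List.mem_cons.1 hx with rfl | hx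
        · omega
        · exact g2 x hx⟩
    · exact ⟨g1, g2⟩

-- Main invariant: from any state whose queues hold only past indices and at
-- most one of which is nonempty, B's pass computes A's two-pointer result on
-- the queues prepended to the positions still to come.
theorem bLoop_eq (k : Int) (arr : List String) :
    ∀ i qp qt c, (∀ x ∈ qp, x < i) → (∀ x ∈ qt, x < i) → (qp = [] ∨ qt = []) →
      bLoop arr k i qp qt c = tpA (qp ++ (collectPT arr i).1) (qt ++ (collectPT arr i).2) k c := by
  induction arr with
  | nil =>
    intro i qp qt c _ _ hone
    rcases hone with rfl | rfl
    · simp [bLoop, collectPT, tpA_nil_left]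
    · simp [bLoop, collectPT, tpA_nil_right]
  | cons s rest ih =>
    intro i qp qt c hqp hqt hone
    have hP := (collectPT_ge rest (i + 1)).1
    have hT := (collectPT_ge rest (i + 1)).2
    obtain ⟨Ep, hEp, hEplt⟩ := expire_decomp qp (i - k)
    obtain ⟨Et, hEt, hEtlt⟩ := expire_decomp qt (i - k)
    by_cases hsP : s == "P"
    · simp only [bLoop, collectPT, hsP, if_pos]
      cases hqt' : expire qt (i - k) with
      | cons t qt' =>
        -- a thief is available: B matches it with i; on A's side the expired
        -- thieves are skipped by the two-pointer and then i matches t.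
        have hqpnil : qp = [] := by
          rcases hone with h | h
          · exact h
          · subst h; simp [expire] at hqt'
        subst hqpnil
        have htlt : t < i := hqt t (expire_mem (by rw [hqt']; exact List.mem_cons_self ..))
        have htge : ¬ t < i - k := expire_head_ge qt (i - k) hqt'
        show bLoop rest k (i + 1) [] qt' (c + 1) = _
        rw [ih (i + 1) [] qt' (c + 1) (by simp)
              (fun x hx => by
                have : x ∈ qt := expire_mem (q := qt) (lim := i - k)
                  (by rw [hqt']; exact List.mem_cons_of_mem _ hx)
                have := hqt x this; omega)
              (Or.inl rfl)]
        conv_rhs => rw [hEt, hqt']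
        simp only [List.nil_append, List.append_assoc, List.cons_append]
        rw [tpA_dropT k Et _ _ c (by
              intro e he p hp
              have he1 := hEtlt e he
              have he2 : e < i := hqt e (by rw [hEt]; exact List.mem_append_left _ he)
              rcases List.mem_cons.1 hp with rfl | hp
              · exact ⟨by omega, by rw [abs_le]; omega⟩
              · have := hP p hp
                exact ⟨by omega, by rw [abs_le]; omega⟩)]
        rw [tpA_cons, if_pos (by rw [abs_le]; omega)]
      | nil =>
        -- no thief available: B enqueues i; on A's side the fully-expired
        -- thief queue (resp. the expired police prefix) is skipped.
        rcases hone with hqpnil | hqtnil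
        · subst hqpnil
          have hall : ∀ x ∈ qt, x < i - k := expire_nil_all qt (i - k) hqt'
          show bLoop rest k (i + 1) [i] [] c = _
          rw [ih (i + 1) [i] [] c (by intro x hx; simp at hx; omega) (by simp) (Or.inr rfl)]
          simp only [List.nil_append, List.cons_append]
          rw [tpA_dropT k qt _ _ c (by
                intro e he p hp
                have he1 := hall e he
                have he2 : e < i := hqt e he
                rcases List.mem_cons.1 hp with rfl | hp
                · exact ⟨by omega, by rw [abs_le]; omega⟩
                · have := hP p hp
                  exact ⟨by omega, by rw [abs_le]; omega⟩)]
        · subst hqtnil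
          show bLoop rest k (i + 1) (expire qp (i - k) ++ [i]) [] c = _
          rw [ih (i + 1) (expire qp (i - k) ++ [i]) [] c
                (by
                  intro x hx
                  rcases List.mem_append.1 hx with hx | hx
                  · have := hqp x (expire_mem hx); omega
                  · simp at hx; omega)
                (by simp) (Or.inr rfl)]
          conv_rhs => rw [hEp]
          simp only [List.nil_append, List.append_assoc, List.cons_append]
          rw [tpA_dropP k Ep _ _ c (by
                intro e he t ht
                have he1 := hEplt e he
                have he2 : e < i := hqp e (by rw [hEp]; exact List.mem_append_left _ he)
                have := hT t ht
                exact ⟨by omega, by rw [abs_le]; omega⟩)]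
    · by_cases hsT : s == "T"
      · simp only [bLoop, collectPT, hsP, hsT, if_pos, Bool.false_eq_true, if_false]
        cases hqp' : expire qp (i - k) with
        | cons p qp' =>
          have hqtnil : qt = [] := by
            rcases hone with h | h
            · subst h; simp [expire] at hqp'
            · exact h
          subst hqtnil
          have hplt : p < i := hqp p (expire_mem (by rw [hqp']; exact List.mem_cons_self ..))
          have hpge : ¬ p < i - k := expire_head_ge qp (i - k) hqp'
          show bLoop rest k (i + 1) qp' [] (c + 1) = _
          rw [ih (i + 1) qp' [] (c + 1)
              (fun x hx => by
                have : x ∈ qp := expire_mem (q := qp) (lim := i - k)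
                  (by rw [hqp']; exact List.mem_cons_of_mem _ hx)
                have := hqp x this; omega)
              (by simp) (Or.inr rfl)]
          conv_rhs => rw [hEp, hqp']
          simp only [List.nil_append, List.append_assoc, List.cons_append]
          rw [tpA_dropP k Ep _ _ c (by
                intro e he t ht
                have he1 := hEplt e he
                have he2 : e < i := hqp e (by rw [hEp]; exact List.mem_append_left _ he)
                rcases List.mem_cons.1 ht with rfl | ht
                · exact ⟨by omega, by rw [abs_le]; omega⟩
                · have := hT t ht
                  exact ⟨by omega, by rw [abs_le]; omega⟩)]
          rw [tpA_cons, if_pos (by rw [abs_le]; omega)]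
        | nil =>
          rcases hone with hqpnil | hqtnil
          · subst hqpnil
            show bLoop rest k (i + 1) [] (expire qt (i - k) ++ [i]) c = _
            rw [ih (i + 1) [] (expire qt (i - k) ++ [i]) c (by simp)
                  (by
                    intro x hx
                    rcases List.mem_append.1 hx with hx | hx
                    · have := hqt x (expire_mem hx); omega
                    · simp at hx; omega)
                  (Or.inl rfl)]
            conv_rhs => rw [hEt]
            simp only [List.nil_append, List.append_assoc, List.cons_append]
            rw [tpA_dropT k Et _ _ c (by
                  intro e he pp hpp
                  have he1 := hEtlt e he
                  have he2 : e < i := hqt e (by rw [hEt]; exact List.mem_append_left _ he)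
                  have := hP pp hpp
                  exact ⟨by omega, by rw [abs_le]; omega⟩)]
          · subst hqtnil
            have hall : ∀ x ∈ qp, x < i - k := expire_nil_all qp (i - k) hqp'
            show bLoop rest k (i + 1) [] [i] c = _
            rw [ih (i + 1) [] [i] c (by simp) (by intro x hx; simp at hx; omega) (Or.inl rfl)]
            simp only [List.nil_append, List.cons_append]
            rw [tpA_dropP k qp _ _ c (by
                  intro e he t ht
                  have he1 := hall e he
                  have he2 : e < i := hqp e he
                  rcases List.mem_cons.1 ht with rfl | ht
                  · exact ⟨by omega, by rw [abs_le]; omega⟩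
                  · have := hT t ht
                    exact ⟨by omega, by rw [abs_le]; omega⟩)]
      · simp only [bLoop, collectPT, hsP, hsT, Bool.false_eq_true, if_false]
        rcases hone with hqpnil | hqtnil
        · subst hqpnil
          show bLoop rest k (i + 1) [] (expire qt (i - k)) c = _
          rw [ih (i + 1) [] (expire qt (i - k)) c (by simp)
                (fun x hx => by have := hqt x (expire_mem hx); omega) (Or.inl rfl)]
          conv_rhs => rw [hEt]
          simp only [List.nil_append, List.append_assoc]
          rw [tpA_dropT k Et _ _ c (by
                intro e he p hp
                have he1 := hEtlt e he
                have he2 : e < i := hqt e (by rw [hEt]; exact List.mem_append_left _ he)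
                have := hP p hp
                exact ⟨by omega, by rw [abs_le]; omega⟩)]
        · subst hqtnil
          show bLoop rest k (i + 1) (expire qp (i - k)) [] c = _
          rw [ih (i + 1) (expire qp (i - k)) [] c
                (fun x hx => by have := hqp x (expire_mem hx); omega) (by simp) (Or.inr rfl)]
          conv_rhs => rw [hEp]
          simp only [List.nil_append, List.append_assoc]
          rw [tpA_dropP k Ep _ _ c (by
                intro e he t ht
                have he1 := hEplt e he
                have he2 : e < i := hqp e (by rw [hEp]; exact List.mem_append_left _ he)
                have := hT t ht
                exact ⟨by omega, by rw [abs_le]; omega⟩)]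

-- ===== VERDICT (by name: the statement is the Claim_ definition above) =====
theorem catchThieves_spec : Claim_equal_catchThieves := by
  intro arr k _
  unfold Spec_catchThieves catchThieves catchThieves_alt
  rw [bLoop_eq k arr 0 [] [] 0 (by simp) (by simp) (Or.inl rfl)]
  simp
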